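-- pv_equiv track=rewrite | github.com/agSant01/advent-of-code-python | 2020/day11.py | findAdjacentWithDirection
-- ===== SOURCE A (Python) =====
-- def findAdjacentWithDirection(seats, x, y):
--     adj = []
--     d1 = ['up', None, 'down']
--     d2 = ['left', None, 'right']
--
--     for i in range(max(0, x-1), min(len(seats), x+2)):
--         for j in range(max(0, y-1), min(len(seats[0]), y+2)):
--             if (i, j) == (x, y):
--                 continue
--             adj.append(((i, j), (d1[i-(x-1)], d2[j-(y-1)])))
--
--     return adj
-- ===== SOURCE B (Python) =====
-- def findAdjacentWithDirection(seats, x, y):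
--     dirs = [(-1, -1, 'up', 'left'), (-1, 0, 'up', None), (-1, 1, 'up', 'right'),
--             (0, -1, None, 'left'), (0, 1, None, 'right'),
--             (1, -1, 'down', 'left'), (1, 0, 'down', None), (1, 1, 'down', 'right')]
--     adj = []
--     for dx, dy, v, h in dirs:
--         i, j = x + dx, y + dy
--         if 0 <= i < len(seats) and 0 <= j < len(seats[0]):
--             adj.append(((i, j), (v, h)))
--     return adj
-- ===== Notes on version B (the rewrite author's own statement) =====
-- stated objective: idiomatic
-- what changed: Replaces the two clipped range() loops (with max/min bounds and list-indexed direction labels) by a single pass over an explicit table of the eight (dx, dy, label) direction tuples in row-major order, appending each in-bounds neighbour.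
import Mathlib
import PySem

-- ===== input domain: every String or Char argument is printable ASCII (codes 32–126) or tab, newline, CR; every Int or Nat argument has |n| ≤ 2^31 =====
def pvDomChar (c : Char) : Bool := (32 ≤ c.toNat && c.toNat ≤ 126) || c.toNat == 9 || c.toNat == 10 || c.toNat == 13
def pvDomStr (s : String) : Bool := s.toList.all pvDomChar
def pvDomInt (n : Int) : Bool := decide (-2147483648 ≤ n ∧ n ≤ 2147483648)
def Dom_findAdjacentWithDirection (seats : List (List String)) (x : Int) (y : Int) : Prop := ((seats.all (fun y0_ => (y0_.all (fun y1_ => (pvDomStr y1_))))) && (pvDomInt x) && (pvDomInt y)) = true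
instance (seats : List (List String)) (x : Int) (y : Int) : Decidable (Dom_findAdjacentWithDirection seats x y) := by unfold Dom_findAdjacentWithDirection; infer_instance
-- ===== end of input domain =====

-- B replaces A's two clipped range() loops by one pass over an explicit table of the eight
-- (dx, dy, direction-label) tuples in row-major order (objective: idiomatic, same cost).


-- ===== PORT A =====
def findAdjacentWithDirection (seats : List (List String)) (x : Int) (y : Int) : List ((Int × Int) × (Option String × Option String)) :=
  let d1 : List (Option String) := [some "up", none, some "down"]
  let d2 : List (Option String) := [some "left", none, some "right"]
  -- len(seats[0]) is only reached when the outer range is nonempty, which forces seats ≠ [];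
  -- seats.headD [] is therefore exactly seats[0] wherever Python evaluates it.
  (PySem.List.pyRange (max 0 (x - 1)) (min (seats.length : Int) (x + 2)) 1).foldl (fun adj i =>
    (PySem.List.pyRange (max 0 (y - 1)) (min ((seats.headD []).length : Int) (y + 2)) 1).foldl (fun adj j =>
      if (i, j) = (x, y) then adj
      else adj ++ [((i, j), (PySem.List.pyGetD d1 (i - (x - 1)) none, PySem.List.pyGetD d2 (j - (y - 1)) none))]) adj) []

-- ===== PORT B =====
-- the eight (dx, dy, vertical label, horizontal label) directions, row-major
def pvDirs : List ((Int × Int) × (Option String × Option String)) :=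
  [((-1, -1), (some "up", some "left")), ((-1, 0), (some "up", none)), ((-1, 1), (some "up", some "right")),
   ((0, -1), (none, some "left")), ((0, 1), (none, some "right")),
   ((1, -1), (some "down", some "left")), ((1, 0), (some "down", none)), ((1, 1), (some "down", some "right"))]

def findAdjacentWithDirection_alt (seats : List (List String)) (x : Int) (y : Int) : List ((Int × Int) × (Option String × Option String)) :=
  -- len(seats[0]) is only reached (Python short-circuit) when 0 ≤ i < len(seats), so seats ≠ [];
  -- seats.headD [] is exactly seats[0] there.
  pvDirs.foldl (fun adj d =>
    let i := x + d.1.1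
    let j := y + d.1.2
    if 0 ≤ i ∧ i < (seats.length : Int) ∧ 0 ≤ j ∧ j < ((seats.headD []).length : Int) then
      adj ++ [((i, j), d.2)]
    else adj) []

-- ===== PRECONDITION & SPEC =====
def Spec_findAdjacentWithDirection (seats : List (List String)) (x : Int) (y : Int) (out : List ((Int × Int) × (Option String × Option String))) : Prop := out = findAdjacentWithDirection_alt seats x y
instance (seats : List (List String)) (x : Int) (y : Int) (out : List ((Int × Int) × (Option String × Option String))) : Decidable (Spec_findAdjacentWithDirection seats x y out) := by unfold Spec_findAdjacentWithDirection; infer_instance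

-- ===== CLAIM (what is proved, stated in full; the proofs are below) =====
def Claim_equal_findAdjacentWithDirection : Prop := ∀ (seats : List (List String)) (x : Int) (y : Int), Dom_findAdjacentWithDirection seats x y → Spec_findAdjacentWithDirection seats x y (findAdjacentWithDirection seats x y)

-- ===== LEMMAS AND PROOFS =====

theorem pvClip3 (n x : Int) :
    PySem.List.pyRange (max 0 (x - 1)) (min n (x + 2)) 1
      = [x - 1, x, x + 1].filter (fun i => decide (0 ≤ i ∧ i < n)) := by
  by_cases h1 : 0 ≤ x - 1
  · rw [max_eq_right h1]
    by_cases h2 : x + 2 ≤ n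
    · rw [min_eq_right h2, PySem.List.pyRange_one_cons (by omega),
        PySem.List.pyRange_one_cons (by omega), PySem.List.pyRange_one_cons (by omega),
        PySem.List.pyRange_one_eq_nil (by omega), List.filter_cons, if_pos (by simp; omega),
        List.filter_cons, if_pos (by simp; omega), List.filter_cons, if_pos (by simp; omega),
        List.filter_nil]
      norm_num
    · rw [min_eq_left (by omega)]
      by_cases h3 : n ≤ x - 1
      · rw [PySem.List.pyRange_one_eq_nil (by omega), List.filter_cons, if_neg (by simp; omega),
          List.filter_cons, if_neg (by simp; omega), List.filter_cons, if_neg (by simp; omega),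
          List.filter_nil]
      · by_cases h4 : n ≤ x
        · rw [PySem.List.pyRange_one_cons (by omega), PySem.List.pyRange_one_eq_nil (by omega),
            List.filter_cons, if_pos (by simp; omega), List.filter_cons, if_neg (by simp; omega),
            List.filter_cons, if_neg (by simp; omega), List.filter_nil]
        · rw [PySem.List.pyRange_one_cons (by omega), PySem.List.pyRange_one_cons (by omega),
            PySem.List.pyRange_one_eq_nil (by omega), List.filter_cons, if_pos (by simp; omega),
            List.filter_cons, if_pos (by simp; omega), List.filter_cons, if_neg (by simp; omega),
            List.filter_nil]
          norm_num
  · rw [max_eq_left (by omega)]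
    by_cases h2 : x ≤ -2
    · rw [PySem.List.pyRange_one_eq_nil (by omega), List.filter_cons, if_neg (by simp; omega),
        List.filter_cons, if_neg (by simp; omega), List.filter_cons, if_neg (by simp; omega),
        List.filter_nil]
    · by_cases hx : x = -1
      · subst hx
        norm_num
        by_cases h3 : n ≤ 0
        · rw [show min n 1 = n from by omega, PySem.List.pyRange_one_eq_nil (by omega)]
          simp [show ¬(0:Int) < n from by omega]
        · rw [show min n 1 = 1 from by omega, PySem.List.pyRange_one_cons (by omega),
            PySem.List.pyRange_one_eq_nil (by omega)]
          simp [show (0:Int) < n from by omega]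
      · have hx0 : x = 0 := by omega
        subst hx0
        norm_num
        by_cases h3 : n ≤ 0
        · rw [show min n 2 = n from by omega, PySem.List.pyRange_one_eq_nil (by omega)]
          simp [show ¬(0:Int) < n from by omega, show ¬(1:Int) < n from by omega]
        · by_cases h4 : n = 1
          · subst h4
            rw [show min (1:Int) 2 = 1 from by omega, PySem.List.pyRange_one_cons (by omega),
              PySem.List.pyRange_one_eq_nil (by omega)]
            simp []
          · rw [show min n 2 = 2 from by omega, PySem.List.pyRange_one_cons (by omega),
              PySem.List.pyRange_one_cons (by omega), PySem.List.pyRange_one_eq_nil (by omega)]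
            simp [show (0:Int) < n from by omega, show (1:Int) < n from by omega]

theorem pvFoldSkip (x y i : Int) (f : Int → ((Int × Int) × (Option String × Option String)))
    (js : List Int) (acc : List ((Int × Int) × (Option String × Option String))) :
    js.foldl (fun adj j => if (i, j) = (x, y) then adj else adj ++ [f j]) acc
      = acc ++ (js.filter (fun j => !decide ((i, j) = (x, y)))).map f := by
  induction js generalizing acc with
  | nil => simp
  | cons j js ih =>
    rw [List.foldl_cons, List.filter_cons]
    by_cases h : (i, j) = (x, y)
    · rw [if_pos h, if_neg (by simp [h]), ih]
    · rw [if_neg h, if_pos (by simp [h]), ih]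
      simp

theorem pvFilterFlatMap (l : List Int) (p : Int → Bool)
    (g : Int → List ((Int × Int) × (Option String × Option String))) :
    (l.filter p).flatMap g = l.flatMap (fun a => if p a then g a else []) := by
  induction l with
  | nil => rfl
  | cons a l ih => by_cases h : p a <;> simp [h, ih]

theorem pvFilterMap (l : List Int) (p : Int → Bool)
    (f : Int → ((Int × Int) × (Option String × Option String))) :
    (l.filter p).map f = l.flatMap (fun a => if p a then [f a] else []) := by
  induction l with
  | nil => rfl
  | cons a l ih => by_cases h : p a <;> simp [h, ih]

theorem pvStep (c : Prop) [Decidable c] (acc : List ((Int × Int) × (Option String × Option String)))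
    (e : (Int × Int) × (Option String × Option String)) :
    (if c then acc ++ [e] else acc) = acc ++ (if c then [e] else []) := by
  split <;> simp

theorem pvRowSplit (c : Prop) [Decidable c] (a b : List ((Int × Int) × (Option String × Option String))) :
    (if c then a ++ b else []) = (if c then a else []) ++ (if c then b else []) := by
  split <;> simp

theorem pvIfIf (c d : Prop) [Decidable c] [Decidable d] (e : List ((Int × Int) × (Option String × Option String))) :
    (if c then (if d then e else []) else []) = if c ∧ d then e else [] := by
  split_ifs with h1 h2 <;> simp_all

-- ===== VERDICT (by name: the statement is the Claim_ definition above) =====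
theorem findAdjacentWithDirection_spec : Claim_equal_findAdjacentWithDirection := by
  intro seats x y _
  unfold Spec_findAdjacentWithDirection
  have c1 : ¬(x - 1 = x) := by omega
  have c2 : ¬(x + 1 = x) := by omega
  have c3 : ¬(y - 1 = y) := by omega
  have c4 : ¬(y + 1 = y) := by omega
  have g1 : PySem.List.pyGetD ([some "up", none, some "down"] : List (Option String)) 0 none = some "up" := by decide
  have g2 : PySem.List.pyGetD ([some "up", none, some "down"] : List (Option String)) 1 none = none := by decide
  have g3 : PySem.List.pyGetD ([some "up", none, some "down"] : List (Option String)) 2 none = some "down" := by decide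
  have g4 : PySem.List.pyGetD ([some "left", none, some "right"] : List (Option String)) 0 none = some "left" := by decide
  have g5 : PySem.List.pyGetD ([some "left", none, some "right"] : List (Option String)) 1 none = none := by decide
  have g6 : PySem.List.pyGetD ([some "left", none, some "right"] : List (Option String)) 2 none = some "right" := by decide
  unfold findAdjacentWithDirection
  simp only [pvFoldSkip]
  rw [PySem.List.foldl_append_eq_flatMap]
  simp only [pvClip3, List.filter_filter, pvFilterFlatMap, pvFilterMap, List.flatMap_cons,
    List.flatMap_nil, List.append_nil, List.nil_append]
  simp only [Prod.mk.injEq, c1, c2, c3, c4, decide_eq_true_eq,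
    and_true, and_false,
    decide_true, decide_false, Bool.not_true, Bool.not_false, Bool.false_and, Bool.true_and,

    show x - 1 - (x - 1) = (0:Int) from by ring, show x - (x - 1) = (1:Int) from by ring,
    show x + 1 - (x - 1) = (2:Int) from by ring,
    show y - 1 - (y - 1) = (0:Int) from by ring, show y - (y - 1) = (1:Int) from by ring,
    show y + 1 - (y - 1) = (2:Int) from by ring, g1, g2, g3, g4, g5, g6]
  simp only [Bool.false_eq_true, if_false, List.nil_append]
  simp only [pvRowSplit, pvIfIf, List.append_assoc]
  simp only [findAdjacentWithDirection_alt, pvDirs, List.foldl_cons, List.foldl_nil, pvStep, List.nil_append, List.append_assoc]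
  simp only [and_assoc, add_zero, show x + -1 = x - 1 from by ring, show y + -1 = y - 1 from by ring]
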